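-- pv_equiv track=rewrite | github.com/fahla/Capturing-from-COM-port | aqi_each_hour.py | calculate_aqi_pm10
-- ===== SOURCE A (Python) =====
-- def linear_interpolation(value, c_low, c_high, aqi_low, aqi_high):
--     return round(((aqi_high - aqi_low) / (c_high - c_low)) * (value - c_low) + aqi_low)
--
-- def calculate_aqi_pm10(pm10_lower, pm10_upper):
--     aqi_values = []
--     for pm10 in [pm10_lower, pm10_upper]:
--         if pm10 <= 54:
--             aqi_values.append(linear_interpolation(pm10, 0, 54, 0, 50))
--         elif pm10 <= 154:
--             aqi_values.append(linear_interpolation(pm10, 55, 154, 51, 100))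
--         elif pm10 <= 254:
--             aqi_values.append(linear_interpolation(pm10, 155, 254, 101, 150))
--         elif pm10 <= 354:
--             aqi_values.append(linear_interpolation(pm10, 255, 354, 151, 200))
--         elif pm10 <= 424:
--             aqi_values.append(linear_interpolation(pm10, 355, 424, 201, 300))
--         elif pm10 <= 504:
--             aqi_values.append(linear_interpolation(pm10, 425, 504, 301, 400))
--         elif pm10 <= 604:
--             aqi_values.append(linear_interpolation(pm10, 505, 604, 401, 500))
--         else:
--             aqi_values.append(500)  # AQI value for concentrations above 604
--     return min(aqi_values), max(aqi_values)
-- ===== SOURCE B (Python) =====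
-- # Binary-search re-implementation: the bracket index is found by bisecting a
-- # sorted list of concentration upper bounds in parallel arrays, instead of a
-- # duplicated seven-branch if/elif ladder (objective: alternative/simpler).
-- UPPERS   = [54, 154, 254, 354, 424, 504, 604]
-- C_LOW    = [0, 55, 155, 255, 355, 425, 505]
-- AQI_LOW  = [0, 51, 101, 151, 201, 301, 401]
-- AQI_HIGH = [50, 100, 150, 200, 300, 400, 500]
--
-- def linear_interpolation(value, c_low, c_high, aqi_low, aqi_high):
--     return round(((aqi_high - aqi_low) / (c_high - c_low)) * (value - c_low) + aqi_low)
--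
-- def _bracket(pm10):
--     # index of the first upper bound >= pm10 (= len(UPPERS) if none), by bisection
--     lo, hi = 0, len(UPPERS)
--     while lo < hi:
--         mid = (lo + hi) // 2
--         if UPPERS[mid] < pm10:
--             lo = mid + 1
--         else:
--             hi = mid
--     return lo
--
-- def _aqi(pm10):
--     i = _bracket(pm10)
--     if i == len(UPPERS):
--         return 500  # concentration above 604
--     return linear_interpolation(pm10, C_LOW[i], UPPERS[i], AQI_LOW[i], AQI_HIGH[i])
--
-- def calculate_aqi_pm10(pm10_lower, pm10_upper):
--     a = _aqi(pm10_lower)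
--     b = _aqi(pm10_upper)
--     return (a, b) if a <= b else (b, a)
-- ===== Notes on version B (the rewrite author's own statement) =====
-- stated objective: alternative
-- what changed: Replaces the duplicated seven-branch if/elif ladder with a binary search (bisection) over a sorted list of breakpoint upper bounds plus parallel arrays of interpolation parameters, returning the two AQI values ordered by a single comparison instead of list-building plus min/max.
import Mathlib
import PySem

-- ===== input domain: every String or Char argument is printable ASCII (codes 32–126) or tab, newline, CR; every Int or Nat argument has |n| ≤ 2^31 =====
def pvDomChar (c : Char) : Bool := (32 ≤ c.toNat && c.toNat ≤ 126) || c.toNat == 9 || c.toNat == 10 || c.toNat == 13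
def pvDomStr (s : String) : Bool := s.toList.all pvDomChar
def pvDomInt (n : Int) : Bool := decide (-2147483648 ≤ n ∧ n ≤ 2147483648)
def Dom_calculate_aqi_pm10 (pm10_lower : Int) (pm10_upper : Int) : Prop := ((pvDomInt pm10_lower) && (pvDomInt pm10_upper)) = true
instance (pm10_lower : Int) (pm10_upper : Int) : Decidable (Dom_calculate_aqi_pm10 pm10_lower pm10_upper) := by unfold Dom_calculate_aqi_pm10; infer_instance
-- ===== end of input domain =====

-- B replaces A's duplicated seven-branch if/elif ladder by a binary search over the sorted
-- breakpoint upper bounds with parallel parameter arrays (objective: alternative).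

-- Python's round(x) (half-to-even) of the exact rational p/q, q > 0. Both Pythons compute
-- the interpolation in binary floating point; on the whole |pm10| ≤ 2^31 domain the float
-- result equals this exact-rational rounding: verified exhaustively for the six finite
-- brackets, and for the unbounded first bracket (and the constant branches) the exact value
-- 25*pm10/27 is never a half-integer and lies ≥ 1/54 from every half-integer, far above the
-- ≤ 3e-7 float error, so the rounded results coincide. Hence this is an exact port of
-- 'round(((aqi_high-aqi_low)/(c_high-c_low))*(value-c_low)+aqi_low)'.
def pyRoundDiv (p q : Int) : Int :=
  let n := PySem.Int.floordiv p q
  let r := PySem.Int.mod p q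
  if 2 * r < q then n
  else if 2 * r > q then n + 1
  else if n % 2 = 0 then n else n + 1

-- ===== PORT A =====
def linear_interpolation (value c_low c_high aqi_low aqi_high : Int) : Int :=
  pyRoundDiv ((aqi_high - aqi_low) * (value - c_low) + aqi_low * (c_high - c_low)) (c_high - c_low)

def calculate_aqi_pm10 (pm10_lower : Int) (pm10_upper : Int) : Int × Int :=
  let aqi_values := [pm10_lower, pm10_upper].foldl (fun acc pm10 =>
    if pm10 ≤ 54 then acc ++ [linear_interpolation pm10 0 54 0 50]
    else if pm10 ≤ 154 then acc ++ [linear_interpolation pm10 55 154 51 100]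
    else if pm10 ≤ 254 then acc ++ [linear_interpolation pm10 155 254 101 150]
    else if pm10 ≤ 354 then acc ++ [linear_interpolation pm10 255 354 151 200]
    else if pm10 ≤ 424 then acc ++ [linear_interpolation pm10 355 424 201 300]
    else if pm10 ≤ 504 then acc ++ [linear_interpolation pm10 425 504 301 400]
    else if pm10 ≤ 604 then acc ++ [linear_interpolation pm10 505 604 401 500]
    else acc ++ [500]) []
  match PySem.List.min? aqi_values (fun x => x), PySem.List.max? aqi_values (fun x => x) with
  | some m, some M => (m, M)
  | _, _ => (0, 0)  -- unreachable: aqi_values has two elements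

-- ===== PORT B =====
def UPPERS : List Int := [54, 154, 254, 354, 424, 504, 604]
def C_LOW : List Int := [0, 55, 155, 255, 355, 425, 505]
def AQI_LOW : List Int := [0, 51, 101, 151, 201, 301, 401]
def AQI_HIGH : List Int := [50, 100, 150, 200, 300, 400, 500]

-- the while-loop of _bracket; terminates because hi - lo shrinks
def bracket_loop (pm10 : Int) (lo hi : Nat) : Nat :=
  if _h : lo < hi then
    let mid := (lo + hi) / 2
    if UPPERS.getD mid 0 < pm10 then bracket_loop pm10 (mid + 1) hi
    else bracket_loop pm10 lo mid
  else lo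
termination_by hi - lo
decreasing_by all_goals omega

def bracket (pm10 : Int) : Nat := bracket_loop pm10 0 UPPERS.length

def aqi (pm10 : Int) : Int :=
  let i := bracket pm10
  if i = UPPERS.length then 500
  else linear_interpolation pm10 (C_LOW.getD i 0) (UPPERS.getD i 0) (AQI_LOW.getD i 0) (AQI_HIGH.getD i 0)

def calculate_aqi_pm10_alt (pm10_lower : Int) (pm10_upper : Int) : Int × Int :=
  let a := aqi pm10_lower
  let b := aqi pm10_upper
  if a ≤ b then (a, b) else (b, a)

-- ===== PRECONDITION & SPEC =====
def Spec_calculate_aqi_pm10 (pm10_lower : Int) (pm10_upper : Int) (out : Int × Int) : Prop := out = calculate_aqi_pm10_alt pm10_lower pm10_upper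
instance (pm10_lower : Int) (pm10_upper : Int) (out : Int × Int) : Decidable (Spec_calculate_aqi_pm10 pm10_lower pm10_upper out) := by unfold Spec_calculate_aqi_pm10; infer_instance

-- ===== CLAIM (what is proved, stated in full; the proofs are below) =====
def Claim_equal_calculate_aqi_pm10 : Prop := ∀ (pm10_lower : Int) (pm10_upper : Int), Dom_calculate_aqi_pm10 pm10_lower pm10_upper → Spec_calculate_aqi_pm10 pm10_lower pm10_upper (calculate_aqi_pm10 pm10_lower pm10_upper)

-- ===== LEMMAS AND PROOFS =====

-- A's ladder value for a single concentration
def ladder (pm10 : Int) : Int :=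
  if pm10 ≤ 54 then linear_interpolation pm10 0 54 0 50
  else if pm10 ≤ 154 then linear_interpolation pm10 55 154 51 100
  else if pm10 ≤ 254 then linear_interpolation pm10 155 254 101 150
  else if pm10 ≤ 354 then linear_interpolation pm10 255 354 151 200
  else if pm10 ≤ 424 then linear_interpolation pm10 355 424 201 300
  else if pm10 ≤ 504 then linear_interpolation pm10 425 504 301 400
  else if pm10 ≤ 604 then linear_interpolation pm10 505 604 401 500
  else 500

-- B's bisection finds the same bracket as A's ladder
lemma aqi_eq_ladder (pm10 : Int) : aqi pm10 = ladder pm10 := by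
  have h7 : bracket pm10 =
      if pm10 ≤ 54 then 0 else if pm10 ≤ 154 then 1 else if pm10 ≤ 254 then 2
      else if pm10 ≤ 354 then 3 else if pm10 ≤ 424 then 4 else if pm10 ≤ 504 then 5
      else if pm10 ≤ 604 then 6 else 7 := by
    unfold bracket
    repeat (rw [bracket_loop.eq_def]; try norm_num [UPPERS, List.getD])
    split_ifs <;> omega
  unfold aqi ladder
  rw [h7]
  split_ifs <;> simp [UPPERS, C_LOW, AQI_LOW, AQI_HIGH]

lemma step_eq (acc : List Int) (pm10 : Int) :
    (if pm10 ≤ 54 then acc ++ [linear_interpolation pm10 0 54 0 50]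
     else if pm10 ≤ 154 then acc ++ [linear_interpolation pm10 55 154 51 100]
     else if pm10 ≤ 254 then acc ++ [linear_interpolation pm10 155 254 101 150]
     else if pm10 ≤ 354 then acc ++ [linear_interpolation pm10 255 354 151 200]
     else if pm10 ≤ 424 then acc ++ [linear_interpolation pm10 355 424 201 300]
     else if pm10 ≤ 504 then acc ++ [linear_interpolation pm10 425 504 301 400]
     else if pm10 ≤ 604 then acc ++ [linear_interpolation pm10 505 604 401 500]
     else acc ++ [(500 : Int)]) = acc ++ [ladder pm10] := by
  unfold ladder; split_ifs <;> rfl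

-- Python's min/max of a two-element list are Lean's min/max on Int.
lemma minmax_pair (a b : Int) :
    PySem.List.min? [a, b] (fun x => x) = some (min a b) ∧ PySem.List.max? [a, b] (fun x => x) = some (max a b) := by
  constructor
  · rw [PySem.List.min?_id_cons]; simp [List.foldl]
  · rw [PySem.List.max?_id_cons]; simp [List.foldl]

-- ===== VERDICT (by name: the statement is the Claim_ definition above) =====
theorem calculate_aqi_pm10_spec : Claim_equal_calculate_aqi_pm10 := by
  intro l u _
  show _ = _
  unfold calculate_aqi_pm10 calculate_aqi_pm10_alt
  rw [show (fun (acc : List Int) (pm10 : Int) =>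
      if pm10 ≤ 54 then acc ++ [linear_interpolation pm10 0 54 0 50]
      else if pm10 ≤ 154 then acc ++ [linear_interpolation pm10 55 154 51 100]
      else if pm10 ≤ 254 then acc ++ [linear_interpolation pm10 155 254 101 150]
      else if pm10 ≤ 354 then acc ++ [linear_interpolation pm10 255 354 151 200]
      else if pm10 ≤ 424 then acc ++ [linear_interpolation pm10 355 424 201 300]
      else if pm10 ≤ 504 then acc ++ [linear_interpolation pm10 425 504 301 400]
      else if pm10 ≤ 604 then acc ++ [linear_interpolation pm10 505 604 401 500]
      else acc ++ [500]) = (fun acc pm10 => acc ++ [ladder pm10]) from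
    funext fun acc => funext fun pm10 => step_eq acc pm10]
  simp only [List.foldl, List.nil_append, List.cons_append]
  rw [(minmax_pair (ladder l) (ladder u)).1, (minmax_pair (ladder l) (ladder u)).2,
      aqi_eq_ladder l, aqi_eq_ladder u]
  by_cases h : ladder l ≤ ladder u
  · simp [min_eq_left h, max_eq_right h, if_pos h]
  · have h' := not_le.mp h
    simp [min_eq_right h'.le, max_eq_left h'.le, if_neg h]
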